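-- pv_equiv track=rewrite | github.com/azariah-seblu/codelegend-answerkey | poison/witch.py | poolHop
-- ===== SOURCE A (Python) =====
-- def poolHop(arr):
--     count = 0
--     for i in range(len(arr)):
--         if count==3:
--             return False
--         if arr[i]==1:
--             count=0
--         else:
--             count+=1
--     if count==3:
--         return False
--     return True
-- ===== SOURCE B (Python) =====
-- def poolHop(arr):
--     # Run-length decomposition: group arr into maximal runs keyed by (x == 1),
--     # then succeed iff every non-1 run is shorter than 3.
--     runs = []  # [key, length] pairs, current run last
--     for x in arr:
--         k = (x == 1)
--         if runs and runs[-1][0] == k: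
--             runs[-1][1] += 1
--         else:
--             runs.append([k, 1])
--     return all(k or n < 3 for k, n in runs)
-- ===== Notes on version B (the rewrite author's own statement) =====
-- stated objective: alternative
-- what changed: Replaced A's stateful early-return counter scan with a run-length decomposition: build the maximal runs keyed by (x == 1) in one pass, then check every non-1 run has length < 3.
import Mathlib
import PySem

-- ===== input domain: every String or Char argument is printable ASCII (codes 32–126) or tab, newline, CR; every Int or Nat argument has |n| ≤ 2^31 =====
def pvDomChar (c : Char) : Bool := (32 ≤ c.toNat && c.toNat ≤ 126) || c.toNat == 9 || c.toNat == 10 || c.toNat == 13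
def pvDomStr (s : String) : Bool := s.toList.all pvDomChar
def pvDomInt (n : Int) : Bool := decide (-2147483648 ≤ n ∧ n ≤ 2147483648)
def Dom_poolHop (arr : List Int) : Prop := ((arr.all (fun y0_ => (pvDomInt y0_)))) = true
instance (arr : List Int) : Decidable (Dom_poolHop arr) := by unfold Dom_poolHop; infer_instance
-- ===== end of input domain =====

-- B replaces A's early-return counter scan by a run-length (groupby) decomposition; alternative, same cost.

-- ===== PORT A =====
-- A's loop over range(len(arr)) with the running counter `count`; early `return False` when count hits 3.
def poolHopLoop : List Int → Int → Bool
  | [], count => !(count == 3)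
  | x :: xs, count =>
      if count == 3 then false
      else poolHopLoop xs (if x == 1 then 0 else count + 1)

def poolHop (arr : List Int) : Bool := poolHopLoop arr 0

-- ===== PORT B =====
-- one step of run building: extend the current (last-seen, kept at the head) run or start a new one
def runStep (runs : List (Bool × Nat)) (x : Int) : List (Bool × Nat) :=
  let k := (x == 1)
  match runs with
  | [] => [(k, 1)]
  | (k', n) :: rest => if k' == k then (k', n + 1) :: rest else (k, 1) :: (k', n) :: rest

def poolHop_alt (arr : List Int) : Bool :=
  (arr.foldl runStep []).all (fun p => p.1 || decide (p.2 < 3))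

-- ===== PRECONDITION & SPEC =====
def Spec_poolHop (arr : List Int) (out : Bool) : Prop := out = poolHop_alt arr
instance (arr : List Int) (out : Bool) : Decidable (Spec_poolHop arr out) := by unfold Spec_poolHop; infer_instance

-- ===== CLAIM (what is proved, stated in full; the proofs are below) =====
def Claim_equal_poolHop : Prop := ∀ (arr : List Int), Dom_poolHop arr → Spec_poolHop arr (poolHop arr)

-- ===== LEMMAS AND PROOFS =====

def allOk (runs : List (Bool × Nat)) : Bool := runs.all (fun p => p.1 || decide (p.2 < 3))

theorem allOk_foldl_cons (x : Int) (xs : List Int) (acc : List (Bool × Nat)) :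
    allOk (List.foldl runStep acc (x :: xs)) = allOk (List.foldl runStep (runStep acc x) xs) := rfl

theorem allOk_cons_false (n : Nat) (rest : List (Bool × Nat)) :
    allOk ((false, n) :: rest) = (decide (n < 3) && allOk rest) := by
  simp [allOk]

theorem allOk_cons_true (m : Nat) (rest : List (Bool × Nat)) :
    allOk ((true, m) :: rest) = allOk rest := by
  simp [allOk]

-- A's loop with a saturated counter is already false
theorem loop_dead (xs : List Int) : poolHopLoop xs 3 = false := by
  cases xs <;> simp [poolHopLoop]

theorem loop_cons_one (xs : List Int) (c : Int) :
    poolHopLoop (1 :: xs) c = (if c == 3 then false else poolHopLoop xs 0) := by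
  simp [poolHopLoop]

theorem loop_cons_not_one (x : Int) (xs : List Int) (hx : ¬ x = 1) (c : Int) :
    poolHopLoop (x :: xs) c = (if c == 3 then false else poolHopLoop xs (c + 1)) := by
  simp [poolHopLoop, hx]

-- combined invariant: the fold started from an accumulator whose head is the current run
-- computes the same verdict as A's loop with the corresponding (capped) counter.
theorem fold_inv (xs : List Int) :
    (∀ (n : Nat) (rest : List (Bool × Nat)),
        allOk (List.foldl runStep ((false, n) :: rest) xs)
          = (allOk rest && poolHopLoop xs (Int.ofNat (min n 3)))) ∧
    (∀ (m : Nat) (rest : List (Bool × Nat)),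
        allOk (List.foldl runStep ((true, m) :: rest) xs)
          = (allOk rest && poolHopLoop xs 0)) := by
  induction xs with
  | nil =>
      constructor
      · intro n rest
        simp only [List.foldl, poolHopLoop, allOk_cons_false]
        by_cases hn : n < 3
        · have hd : decide (n < 3) = true := by simpa using hn
          simp [hd, show ¬ (3:Nat) ≤ n from by omega]
        · have hd : decide (n < 3) = false := by simpa using hn
          simp [hd, show (3:Nat) ≤ n from by omega]
      · intro m rest
        simp [allOk_cons_true, poolHopLoop]
  | cons x xs ih =>
      obtain ⟨ihF, ihT⟩ := ih
      constructor
      · intro n rest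
        rw [allOk_foldl_cons]
        by_cases hx : x = 1
        · -- a 1 starts/continues a run of 1s: counter resets to 0
          have hs : runStep ((false, n) :: rest) x = (true, 1) :: (false, n) :: rest := by
            simp [runStep, hx]
          rw [hs, ihT, allOk_cons_false, hx, loop_cons_one]
          by_cases hn : n < 3
          · have hd : decide (n < 3) = true := by simpa using hn
            simp [hd, show ¬ (3:Nat) ≤ n from by omega]
          · have hd : decide (n < 3) = false := by simpa using hn
            simp [hd, show (3:Nat) ≤ n from by omega]
        · -- non-1 continues the current non-1 run
          have hs : runStep ((false, n) :: rest) x = (false, n + 1) :: rest := by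
            simp [runStep, hx]
          rw [hs, ihF (n + 1) rest, loop_cons_not_one x xs hx]
          by_cases hn : n < 3
          · have hc : (Int.ofNat (min n 3) == 3) = false := by simp; omega
            have harg : Int.ofNat (min n 3) + 1 = Int.ofNat (min (n + 1) 3) := by
              simp; omega
            rw [hc, if_neg (by simp), harg]
          · have hc : (Int.ofNat (min n 3) == 3) = true := by simp; omega
            have h3 : Int.ofNat (min (n + 1) 3) = 3 := by simp; omega
            rw [hc, if_pos rfl, h3, loop_dead]
      · intro m rest
        rw [allOk_foldl_cons]
        by_cases hx : x = 1
        · have hs : runStep ((true, m) :: rest) x = (true, m + 1) :: rest := by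
            simp [runStep, hx]
          rw [hs, ihT (m + 1) rest, hx, loop_cons_one]
          simp
        · have hs : runStep ((true, m) :: rest) x = (false, 1) :: (true, m) :: rest := by
            simp [runStep, hx]
          rw [hs, ihF 1 ((true, m) :: rest), allOk_cons_true,
              loop_cons_not_one x xs hx, if_neg (by simp)]
          norm_num

-- ===== VERDICT (by name: the statement is the Claim_ definition above) =====
theorem poolHop_spec : Claim_equal_poolHop := by
  intro arr _
  show poolHop arr = poolHop_alt arr
  cases arr with
  | nil => rfl
  | cons x xs =>
      show poolHopLoop (x :: xs) 0 = allOk (List.foldl runStep [] (x :: xs))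
      have hstep : List.foldl runStep [] (x :: xs)
          = List.foldl runStep [((x == 1), 1)] xs := by
        simp [runStep]
      rw [hstep]
      by_cases hx : x = 1
      · rw [hx, show ((1 : Int) == 1) = true from rfl, (fold_inv xs).2 1 [], loop_cons_one,
            if_neg (by simp)]
        simp [allOk]
      · rw [show ((x : Int) == 1) = false from by simpa using hx,
            (fold_inv xs).1 1 [], loop_cons_not_one x xs hx, if_neg (by simp)]
        norm_num [allOk]
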